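-- pv_equiv track=rewrite | github.com/simonvoelk/pp3 | importer.py | _build_prefix3_zkp_mapping
-- ===== SOURCE A (Python) =====
-- from typing import Dict, List, Optional, Tuple
--
-- def _normalize_sys_id(raw_value: object) -> str:
--     """Normalisiert SYS_ID-Werte aus XML/Excel fuer robuste Vergleiche."""
--     return str(raw_value).strip() if raw_value is not None else ""
--
-- def _sys_id_prefix3(sys_id: str) -> str:
--     """Liefert den SYS_ID-Praefix aus den ersten 3 Gruppen."""
--     value = _normalize_sys_id(sys_id)
--     if not value:
--         return ""
--     parts = value.split(".")
--     if len(parts) < 3: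
--         return ""
--     return ".".join(parts[:3])
--
-- def _build_prefix3_zkp_mapping(mapping: Dict[str, str]) -> Dict[str, str]:
--     """Erzeugt konfliktfreie ZKP-Zuordnung ueber SYS_ID-Praefix (erste 3 Gruppen)."""
--     prefix_map: Dict[str, str] = {}
--     conflicts: set[str] = set()
--
--     for sys_id, zkp in mapping.items():
--         prefix = _sys_id_prefix3(sys_id)
--         if not prefix:
--             continue
--         existing = prefix_map.get(prefix)
--         if existing is None:
--             prefix_map[prefix] = zkp
--             continue
--         if existing != zkp:
--             conflicts.add(prefix)
--
--     for prefix in conflicts: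
--         prefix_map.pop(prefix, None)
--     return prefix_map
-- ===== SOURCE B (Python) =====
-- def _prefix3(sys_id: str) -> str:
--     parts = sys_id.strip().split(".")
--     return ".".join(parts[:3]) if len(parts) >= 3 else ""
--
-- def _build_prefix3_zkp_mapping(mapping):
--     pairs = [(_prefix3(sid), zkp) for sid, zkp in mapping.items()]
--     pairs = [(p, z) for p, z in pairs if p]
--     return {p: z for p, z in pairs
--             if all(z2 == z for p2, z2 in pairs if p2 == p)}
-- ===== Notes on version B (the rewrite author's own statement) =====
-- stated objective: alternative
-- what changed: B materialises the flat list of (prefix, zkp) pairs in two comprehension passes and then builds the result with a dict comprehension that keeps a pair iff a full scan of the pair list finds no other value for its prefix, replacing A's incremental first-value map plus conflict set plus deletion pass.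
import Mathlib
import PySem

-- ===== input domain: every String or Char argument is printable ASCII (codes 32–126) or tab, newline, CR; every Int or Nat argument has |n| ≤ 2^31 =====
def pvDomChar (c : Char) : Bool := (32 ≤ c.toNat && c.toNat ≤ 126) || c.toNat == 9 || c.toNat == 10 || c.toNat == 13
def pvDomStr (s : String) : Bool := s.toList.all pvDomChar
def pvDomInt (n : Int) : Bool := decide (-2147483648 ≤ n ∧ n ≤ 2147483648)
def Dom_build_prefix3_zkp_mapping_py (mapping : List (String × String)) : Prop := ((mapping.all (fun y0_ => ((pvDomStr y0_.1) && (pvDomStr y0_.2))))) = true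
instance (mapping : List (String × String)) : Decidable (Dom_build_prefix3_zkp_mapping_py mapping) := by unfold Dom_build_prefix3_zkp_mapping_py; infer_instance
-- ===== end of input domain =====

-- B materialises the flat (prefix, zkp) pair list and builds the result by a dict
-- comprehension whose guard re-scans that list for a conflicting value, replacing A's
-- incremental first-value map + conflict set + deletion pass: alternative, same result.

-- ===== PORT A =====
-- _sys_id_prefix3 (with _normalize_sys_id inlined as str().strip(); the argument is a str).
-- '.': a nonempty separator, so Python's value.split(".") never raises: split? is always 'some'.
def sysIdPrefix3 (sysId : String) : String :=
  let value := PySem.Str.strip sysId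
  if value = "" then ""
  else
    let parts := (PySem.Str.split? value ".").getD []
    if parts.length < 3 then ""
    else PySem.Str.join "." (PySem.List.slice parts none (some 3))

-- loop body of A: state = (prefix_map, conflicts)
def buildStepA (st : PySem.Dict String String × PySem.Set String) (p : String × String) :
    PySem.Dict String String × PySem.Set String :=
  let pfx := sysIdPrefix3 p.1
  if pfx = "" then st
  else
    match st.1.get? pfx with
    | none => (st.1.insert pfx p.2, st.2)
    | some existing => if existing ≠ p.2 then (st.1, PySem.Set.add st.2 pfx) else st

def build_prefix3_zkp_mapping_py (mapping : List (String × String)) : List (String × String) :=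
  let st := mapping.foldl buildStepA (PySem.Dict.empty, PySem.Set.empty)
  (st.2.foldl (fun d pfx => d.erase pfx) st.1).items

-- ===== PORT B =====
-- B's _prefix3: strip, split, join of the first three parts when there are at least three.
def prefix3Alt (sysId : String) : String :=
  let parts := (PySem.Str.split? (PySem.Str.strip sysId) ".").getD []
  if 3 ≤ parts.length then PySem.Str.join "." (PySem.List.slice parts none (some 3)) else ""

-- pairs = [(_prefix3(sid), zkp) ...]; pairs = [(p, z) for p, z in pairs if p]
def pairsOf (mapping : List (String × String)) : List (String × String) :=
  ((mapping.map (fun q => (prefix3Alt q.1, q.2))).filter (fun q => !(q.1 == "")))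

-- {p: z for p, z in pairs if all(z2 == z for p2, z2 in pairs if p2 == p)}
def build_prefix3_zkp_mapping_py_alt (mapping : List (String × String)) : List (String × String) :=
  let pairs := pairsOf mapping
  (pairs.foldl (fun d q =>
      if pairs.all (fun r => !(r.1 == q.1) || (r.2 == q.2))
      then d.insert q.1 q.2 else d) PySem.Dict.empty).items

-- ===== PRECONDITION & SPEC =====
def Spec_build_prefix3_zkp_mapping_py (mapping : List (String × String)) (out : List (String × String)) : Prop := out = build_prefix3_zkp_mapping_py_alt mapping
instance (mapping : List (String × String)) (out : List (String × String)) : Decidable (Spec_build_prefix3_zkp_mapping_py mapping out) := by unfold Spec_build_prefix3_zkp_mapping_py; infer_instance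

-- ===== CLAIM (what is proved, stated in full; the proofs are below) =====
def Claim_equal_build_prefix3_zkp_mapping_py : Prop := ∀ (mapping : List (String × String)), Dom_build_prefix3_zkp_mapping_py mapping → Spec_build_prefix3_zkp_mapping_py mapping (build_prefix3_zkp_mapping_py mapping)

-- ===== LEMMAS AND PROOFS =====

-- the two prefix helpers agree
lemma prefix3Alt_eq (s : String) : prefix3Alt s = sysIdPrefix3 s := by
  unfold prefix3Alt sysIdPrefix3
  by_cases h : PySem.Str.strip s = ""
  · rw [h]
    have : (PySem.Str.split? "" ".").getD [] = [""] := by decide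
    simp [this]
  · simp only [h, if_false]
    by_cases h3 : 3 ≤ ((PySem.Str.split? (PySem.Str.strip s) ".").getD []).length
    · simp [h3, Nat.not_lt.mpr h3]
    · simp only [h3, if_false]
      rw [if_pos (by omega)]

-- proof-side grouping loop over the raw mapping (skips empty prefixes), as in A
def buildStepB (g : PySem.Dict String (PySem.Set String)) (p : String × String) :
    PySem.Dict String (PySem.Set String) :=
  let pfx := prefix3Alt p.1
  if pfx = "" then g
  else g.modify pfx PySem.Set.empty (fun s => PySem.Set.add s p.2)

-- the same grouping loop over the pair list (no skip)
def stepB2 (g : PySem.Dict String (PySem.Set String)) (q : String × String) :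
    PySem.Dict String (PySem.Set String) :=
  g.modify q.1 PySem.Set.empty (fun s => PySem.Set.add s q.2)

-- B's guard and the per-item mask / singleton selector
def condB (L : List (String × String)) (p z : String) : Bool :=
  L.all (fun r => !(r.1 == p) || (r.2 == z))

def maskB (L : List (String × String)) (q : String × PySem.Set String) :
    Option (String × String) :=
  if condB L q.1 (q.2.headD "") then some (q.1, q.2.headD "") else none

def singB (q : String × PySem.Set String) : Option (String × String) :=
  match q.2 with | [v] => some (q.1, v) | _ => none

-- the invariant tying A's (prefix_map, conflicts) to the groups dict
def InvAB (d : PySem.Dict String String) (c : PySem.Set String)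
    (g : PySem.Dict String (PySem.Set String)) : Prop :=
  d.items = g.items.map (fun q => (q.1, q.2.headD "")) ∧
  (∀ q ∈ g.items, q.2 ≠ []) ∧
  (∀ k : String, k ∈ c ↔ ∃ s, g.get? k = some s ∧ 2 ≤ s.length) ∧
  g.keys.Nodup

lemma get?_bridge (g : PySem.Dict String (PySem.Set String)) (d : PySem.Dict String String)
    (h : d.items = g.items.map (fun q => (q.1, q.2.headD ""))) (k : String) :
    d.get? k = (g.get? k).map (fun s => s.headD "") := by
  simp only [PySem.Dict.get?, h, List.find?_map, Function.comp_def]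
  cases List.find? (fun p => p.1 == k) g.items <;> simp

lemma headD_append {α : Type} (s t : List α) (a : α) (h : s ≠ []) :
    (s ++ t).headD a = s.headD a := by
  cases s with
  | nil => exact absurd rfl h
  | cons x xs => rfl

lemma headD_mem {α : Type} (s : List α) (a : α) (h : s ≠ []) : s.headD a ∈ s := by
  cases s with
  | nil => exact absurd rfl h
  | cons x xs => exact List.mem_cons_self ..

lemma items_key_eq (g : PySem.Dict String (PySem.Set String)) (hnodup : g.keys.Nodup)
    {q : String × PySem.Set String} (hq : q ∈ g.items) {s : PySem.Set String}
    (hg : g.get? q.1 = some s) : q.2 = s := by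
  have := PySem.Dict.get?_of_mem_items g (show (q.1, q.2) ∈ g.items from hq) hnodup
  rw [this] at hg
  exact Option.some.inj hg

lemma add_ne_nil (s : PySem.Set String) (x : String) (h : s ≠ []) :
    PySem.Set.add s x ≠ [] := by
  rw [PySem.Set.add_eq_ite]
  split
  · exact h
  · simp

lemma headD_add (s : PySem.Set String) (x : String) (h : s ≠ []) :
    (PySem.Set.add s x).headD "" = s.headD "" := by
  rw [PySem.Set.add_eq_ite]
  split
  · rfl
  · exact headD_append s [x] "" h

lemma inv_step (d : PySem.Dict String String) (c : PySem.Set String)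
    (g : PySem.Dict String (PySem.Set String)) (p : String × String) (h : InvAB d c g) :
    InvAB (buildStepA (d, c) p).1 (buildStepA (d, c) p).2 (buildStepB g p) := by
  obtain ⟨hitems, hne, hconf, hnodup⟩ := h
  unfold buildStepA buildStepB
  rw [prefix3Alt_eq]
  by_cases hk0 : sysIdPrefix3 p.1 = ""
  · rw [if_pos hk0, if_pos hk0]
    exact ⟨hitems, hne, hconf, hnodup⟩
  · rw [if_neg hk0, if_neg hk0]
    set k := sysIdPrefix3 p.1 with hkdef
    have hget := get?_bridge g d hitems k
    simp only [PySem.Dict.modify]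
    cases hg : g.get? k with
    | none =>
      have hd : d.get? k = none := by rw [hget, hg]; rfl
      rw [hd]
      have hgc : g.contains k = false := (PySem.Dict.get?_eq_none_iff_contains g k).mp hg
      have hdc : d.contains k = false := (PySem.Dict.get?_eq_none_iff_contains d k).mp hd
      have hgetD : g.getD k PySem.Set.empty = [] := by
        simp [PySem.Dict.getD, hg, PySem.Set.empty]
      rw [hgetD]
      refine ⟨?_, ?_, ?_, PySem.Dict.nodup_keys_insert g k _ hnodup⟩
      · rw [PySem.Dict.items_insert_of_not_contains d p.2 hdc,
            PySem.Dict.items_insert_of_not_contains g _ hgc, List.map_append, ← hitems]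
        rfl
      · intro q hq
        rw [PySem.Dict.items_insert_of_not_contains g _ hgc] at hq
        rcases List.mem_append.mp hq with hq | hq
        · exact hne q hq
        · simp at hq
          rw [hq]
          simp
      · intro k'
        by_cases hk' : k' = k
        · subst hk'
          rw [PySem.Dict.get?_insert_self]
          constructor
          · intro hmem
            obtain ⟨s, hs, _⟩ := (hconf k).mp hmem
            rw [hg] at hs
            exact absurd hs (by simp)
          · rintro ⟨s, hs, hlen⟩
            have : s = PySem.Set.add [] p.2 := (Option.some.inj hs).symm
            rw [this] at hlen
            simp [PySem.Set.add, PySem.Set.contains] at hlen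
        · rw [PySem.Dict.get?_insert_of_ne g _ hk']
          exact hconf k'
    | some s =>
      have hd : d.get? k = some (s.headD "") := by rw [hget, hg]; rfl
      simp only [hd]
      have hmem : (k, s) ∈ g.items := PySem.Dict.mem_items_of_get?_eq_some g hg
      have hsne : s ≠ [] := hne _ hmem
      have hgetD : g.getD k PySem.Set.empty = s := by simp [PySem.Dict.getD, hg]
      have hgc : g.contains k = true := by
        rcases hb : g.contains k with _ | _
        · rw [(PySem.Dict.get?_eq_none_iff_contains g k).mpr hb] at hg; exact absurd hg (by simp)
        · rfl
      rw [hgetD]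
      by_cases hev : s.headD "" = p.2
      · -- existing == zkp: A leaves the state; the grouping add is a no-op, g unchanged
        rw [if_neg (by simpa using hev)]
        have hp2s : p.2 ∈ s := hev ▸ headD_mem s "" hsne
        have hadd : PySem.Set.add s p.2 = s := PySem.Set.add_of_mem hp2s
        have hgeq : g.insert k (PySem.Set.add s p.2) = g := by
          apply PySem.Dict.ext
          rw [hadd, PySem.Dict.items_insert_of_contains g s hgc]
          have : List.map (fun p => if (p.1 == k) = true then (k, s) else p) g.items
              = List.map id g.items := by
            apply List.map_congr_left
            intro q hq
            rcases hqk : (q.1 == k) with _ | _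
            · simp
            · have hq1 : q.1 = k := by simpa using hqk
              have hq2 := items_key_eq g hnodup hq (hq1 ▸ hg)
              simp only [id_eq]
              rw [← hq1, ← hq2]
              simp
          simpa using this
        rw [hgeq]
        exact ⟨hitems, hne, hconf, hnodup⟩
      · -- conflict: A records k in conflicts; the group at k grows to size ≥ 2
        rw [if_pos (by simpa using hev)]
        refine ⟨?_, ?_, ?_, PySem.Dict.nodup_keys_insert g k _ hnodup⟩
        · rw [PySem.Dict.items_insert_of_contains g _ hgc, List.map_map, hitems]
          apply List.map_congr_left
          intro q hq
          rcases hqk : (q.1 == k) with _ | _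
          · have hne' : q.1 ≠ k := by simpa using hqk
            simp [hne']
          · have hq1 : q.1 = k := by simpa using hqk
            have hq2 : q.2 = s := items_key_eq g hnodup hq (hq1 ▸ hg)
            simp only [Function.comp_def, if_pos hqk]
            rw [headD_add s p.2 hsne, hq1, hq2]
        · intro q hq
          rw [PySem.Dict.items_insert_of_contains g _ hgc] at hq
          obtain ⟨q', hq', hq'eq⟩ := List.mem_map.mp hq
          rcases hqk : (q'.1 == k) with _ | _
          · rw [← hq'eq]; simp only [hqk]; simp
            exact hne q' hq'
          · rw [← hq'eq]; simp only [hqk]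
            exact add_ne_nil s p.2 hsne
        · intro k'
          rw [PySem.Set.mem_add]
          by_cases hk' : k' = k
          · subst hk'
            rw [PySem.Dict.get?_insert_self]
            constructor
            · intro _
              refine ⟨_, rfl, ?_⟩
              rw [PySem.Set.add_eq_ite]
              split
              · rename_i hps
                cases s with
                | nil => exact absurd rfl hsne
                | cons a t =>
                  cases t with
                  | nil =>
                    simp at hps
                    exact absurd hps.symm (by simpa using hev)
                  | cons b r => simp
              · have : 1 ≤ s.length := by
                  cases s with
                  | nil => exact absurd rfl hsne
                  | cons a t => simp
                simp; omega
            · intro _; right; rfl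
          · rw [PySem.Dict.get?_insert_of_ne g _ hk']
            constructor
            · rintro (hmem | hmem)
              · exact (hconf k').mp hmem
              · exact absurd hmem hk'
            · intro hx; left; exact (hconf k').mpr hx

lemma inv_foldl (l : List (String × String)) (d : PySem.Dict String String)
    (c : PySem.Set String) (g : PySem.Dict String (PySem.Set String)) (h : InvAB d c g) :
    InvAB (l.foldl buildStepA (d, c)).1 (l.foldl buildStepA (d, c)).2 (l.foldl buildStepB g) := by
  induction l generalizing d c g with
  | nil => exact h
  | cons p t ih =>
    simp only [List.foldl_cons]
    have hstep := inv_step d c g p h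
    rcases hA : buildStepA (d, c) p with ⟨d1, c1⟩
    rw [hA] at hstep
    exact ih d1 c1 (buildStepB g p) hstep

set_option maxHeartbeats 1000000 in
lemma erase_foldl_items (c : List String) (d : PySem.Dict String String) :
    (c.foldl (fun d pfx => d.erase pfx) d).items
      = d.items.filter (fun p => !(c.contains p.1)) := by
  induction c generalizing d with
  | nil => simp
  | cons x t ih =>
    rw [List.foldl_cons, ih]
    simp only [PySem.Dict.erase, List.filter_filter]
    apply List.filter_congr
    intro p _
    simp only [List.contains_cons, Bool.not_or]
    exact Bool.and_comm _ _

lemma final_lists (l : List (String × PySem.Set String)) (c : List String)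
    (h : ∀ q ∈ l, q.2 ≠ [] ∧ (c.contains q.1 = true ↔ 2 ≤ q.2.length)) :
    ((l.map (fun q => (q.1, q.2.headD ""))).filter (fun p => !(c.contains p.1)))
      = l.filterMap singB := by
  induction l with
  | nil => rfl
  | cons q t ih =>
    obtain ⟨hne, hc⟩ := h q (List.mem_cons_self ..)
    have ht := fun q hq => h q (List.mem_cons_of_mem _ hq)
    match hq2 : q.2 with
    | [] => exact absurd hq2 hne
    | [v] =>
      have hm : q.1 ∉ c := by
        intro hmem
        have := hc.mp (by simpa using hmem)
        rw [hq2] at this; simp at this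
      simpa [List.filter_cons, singB, hq2, hm] using ih ht
    | v :: w :: r =>
      have hm : q.1 ∈ c := by
        have := hc.mpr (by rw [hq2]; simp)
        simpa using this
      simpa [List.filter_cons, singB, hq2, hm] using ih ht

-- A's result, characterised through the groups dict
lemma A_eq_filterMap_sing (mapping : List (String × String)) :
    build_prefix3_zkp_mapping_py mapping
      = (mapping.foldl buildStepB PySem.Dict.empty).items.filterMap singB := by
  unfold build_prefix3_zkp_mapping_py
  have h0 : InvAB PySem.Dict.empty PySem.Set.empty PySem.Dict.empty := by
    refine ⟨rfl, by simp [PySem.Dict.empty], ?_, PySem.Dict.nodup_keys_empty⟩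
    intro k
    simp [PySem.Set.empty, PySem.Dict.get?_empty]
  obtain ⟨hitems, hne, hconf, hnodup⟩ :=
    inv_foldl mapping PySem.Dict.empty PySem.Set.empty PySem.Dict.empty h0
  set g := mapping.foldl buildStepB PySem.Dict.empty with hg
  rw [erase_foldl_items, hitems]
  apply final_lists
  intro q hq
  refine ⟨hne q hq, ?_⟩
  have hget : g.get? q.1 = some q.2 := PySem.Dict.get?_of_mem_items g hq hnodup
  constructor
  · intro hcont
    have := (hconf q.1).mp (by simpa using hcont)
    obtain ⟨s, hs, hlen⟩ := this
    rw [hget] at hs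
    injection hs with hs
    rw [hs]; exact hlen
  · intro hlen
    simpa using (hconf q.1).mpr ⟨q.2, hget, hlen⟩

-- the grouping loop over mapping equals the grouping loop over the pair list
lemma pairsOf_cons (p : String × String) (t : List (String × String)) :
    pairsOf (p :: t)
      = if prefix3Alt p.1 == "" then pairsOf t else (prefix3Alt p.1, p.2) :: pairsOf t := by
  unfold pairsOf
  rw [List.map_cons, List.filter_cons]
  generalize prefix3Alt p.1 = a
  by_cases h : a = ""
  · subst h; simp
  · simp [h]

lemma foldlB_eq_pairs (l : List (String × String)) (g : PySem.Dict String (PySem.Set String)) :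
    l.foldl buildStepB g = (pairsOf l).foldl stepB2 g := by
  induction l generalizing g with
  | nil => simp [pairsOf]
  | cons p t ih =>
    rw [List.foldl_cons, pairsOf_cons]
    by_cases h : prefix3Alt p.1 = ""
    · rw [if_pos (by simp [h])]
      have hstep : buildStepB g p = g := by
        unfold buildStepB
        rw [if_pos h]
      rw [hstep, ih]
    · rw [if_neg (by simp [h])]
      have hstep : buildStepB g p = stepB2 g (prefix3Alt p.1, p.2) := by
        unfold buildStepB stepB2
        rw [if_neg h]
      rw [hstep, List.foldl_cons, ih]

-- condB read as a proposition
lemma condB_iff (L : List (String × String)) (p z : String) :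
    condB L p z = true ↔ ∀ r ∈ L, r.1 = p → r.2 = z := by
  unfold condB
  rw [List.all_eq_true]
  constructor
  · intro h r hr hrp
    have h' := h r hr
    simp at h'
    rcases h' with h' | h'
    · exact absurd hrp h'
    · exact h'
  · intro h r hr
    simp
    by_cases hp : r.1 = p
    · right; exact h r hr hp
    · left; exact hp

-- the groups fold preserves group membership
lemma stepB2_mono (l : List (String × String)) (g : PySem.Dict String (PySem.Set String))
    (k : String) (s : PySem.Set String) (h : g.get? k = some s) :
    ∃ s', (l.foldl stepB2 g).get? k = some s' ∧ ∀ v ∈ s, v ∈ s' := by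
  induction l generalizing g s with
  | nil => exact ⟨s, h, fun v hv => hv⟩
  | cons q t ih =>
    rw [List.foldl_cons]
    by_cases hk : k = q.1
    · have hD : g.getD q.1 PySem.Set.empty = s := by
        simp [PySem.Dict.getD, hk ▸ h]
      have hs2 : (stepB2 g q).get? k = some (PySem.Set.add s q.2) := by
        simp only [stepB2, PySem.Dict.modify, hD]
        rw [hk]
        exact PySem.Dict.get?_insert_self ..
      obtain ⟨s', hs', hsub⟩ := ih _ _ hs2
      exact ⟨s', hs', fun v hv => hsub v ((PySem.Set.mem_add ..).mpr (Or.inl hv))⟩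
    · have hs2 : (stepB2 g q).get? k = some s := by
        simp only [stepB2, PySem.Dict.modify]
        rw [PySem.Dict.get?_insert_of_ne g _ hk]
        exact h
      exact ih _ _ hs2

-- completeness: every processed value lands in its key's group
lemma groups_complete (l : List (String × String)) (g : PySem.Dict String (PySem.Set String)) :
    ∀ q ∈ l, ∃ s, (l.foldl stepB2 g).get? q.1 = some s ∧ q.2 ∈ s := by
  induction l generalizing g with
  | nil => intro q hq; cases hq
  | cons r t ih =>
    intro q hq
    rcases List.mem_cons.mp hq with hq | hq
    · subst hq
      simp only [List.foldl_cons, stepB2, PySem.Dict.modify]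
      obtain ⟨s', hs', hsub⟩ := stepB2_mono t
        (g.insert q.1 (PySem.Set.add (g.getD q.1 PySem.Set.empty) q.2))
        q.1 (PySem.Set.add (g.getD q.1 PySem.Set.empty) q.2) (PySem.Dict.get?_insert_self ..)
      exact ⟨s', hs', hsub _ ((PySem.Set.mem_add ..).mpr (Or.inr rfl))⟩
    · simpa only [List.foldl_cons] using ih _ q hq

-- invariant tying B's result dict to the groups dict (L is the full fixed pair list)
def Inv2 (L : List (String × String)) (g : PySem.Dict String (PySem.Set String))
    (d : PySem.Dict String String) : Prop :=
  d.items = g.items.filterMap (maskB L) ∧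
  (∀ q ∈ g.items, q.2 ≠ [] ∧ q.2.Nodup ∧ ∀ v ∈ q.2, (q.1, v) ∈ L) ∧
  g.keys.Nodup

def stepD (L : List (String × String)) (d : PySem.Dict String String)
    (q : String × String) : PySem.Dict String String :=
  if condB L q.1 q.2 then d.insert q.1 q.2 else d

lemma inv2_step (L : List (String × String)) (g : PySem.Dict String (PySem.Set String))
    (d : PySem.Dict String String) (q : String × String) (hqL : q ∈ L)
    (h : Inv2 L g d) : Inv2 L (stepB2 g q) (stepD L d q) := by
  obtain ⟨hitems, hgood, hnodup⟩ := h
  obtain ⟨p, z⟩ := q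
  simp only [stepB2, stepD, PySem.Dict.modify]
  cases hg : g.get? p with
  | none =>
    have hgc : g.contains p = false := (PySem.Dict.get?_eq_none_iff_contains g p).mp hg
    have hgetD : g.getD p PySem.Set.empty = [] := by simp [PySem.Dict.getD, hg, PySem.Set.empty]
    have hadd : PySem.Set.add (g.getD p PySem.Set.empty) z = [z] := by rw [hgetD]; rfl
    rw [hadd]
    have hitems' : (g.insert p [z]).items = g.items ++ [(p, [z])] :=
      PySem.Dict.items_insert_of_not_contains g _ hgc
    refine ⟨?_, ?_, PySem.Dict.nodup_keys_insert g p _ hnodup⟩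
    · by_cases hc : condB L p z = true
      · -- p is fresh for d too: d's keys come from g's
        have hdp : d.contains p = false := by
          rcases hb : d.contains p with _ | _
          · rfl
          · exfalso
            have hmem : p ∈ d.keys := (PySem.Dict.contains_iff_mem_keys d p).mp hb
            simp only [PySem.Dict.keys, hitems] at hmem
            obtain ⟨e, he, he1⟩ := List.mem_map.mp hmem
            obtain ⟨e', he', hmask⟩ := List.mem_filterMap.mp he
            have hee : e'.1 = e.1 := by
              unfold maskB at hmask
              split at hmask
              · cases hmask; rfl
              · cases hmask
            have hpk : p ∈ g.keys := by
              simp only [PySem.Dict.keys]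
              rw [← he1, ← hee]
              exact List.mem_map_of_mem he'
            exact (PySem.Dict.get?_eq_none_iff_not_mem_keys g p).mp hg hpk
        rw [if_pos hc, PySem.Dict.items_insert_of_not_contains d z hdp, hitems', hitems,
            List.filterMap_append]
        have : maskB L (p, [z]) = some (p, z) := by
          unfold maskB
          simpa using hc
        simp [this]
      · rw [if_neg (by simpa using hc), hitems', hitems, List.filterMap_append]
        have : maskB L (p, [z]) = none := by
          unfold maskB
          simpa using hc
        simp [this]
    · intro e he
      rw [hitems'] at he
      rcases List.mem_append.mp he with he | he
      · exact hgood e he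
      · simp only [List.mem_singleton] at he
        subst he
        exact ⟨by simp, by simp, by intro v hv; simp at hv; subst hv; exact hqL⟩
  | some s =>
    obtain ⟨hsne, hsnd, hsL⟩ := hgood (p, s) (PySem.Dict.mem_items_of_get?_eq_some g hg)
    have hgetD : g.getD p PySem.Set.empty = s := by simp [PySem.Dict.getD, hg]
    have hgc : g.contains p = true := by
      rcases hb : g.contains p with _ | _
      · rw [(PySem.Dict.get?_eq_none_iff_contains g p).mpr hb] at hg; exact absurd hg (by simp)
      · rfl
    rw [hgetD]
    have hitems' : (g.insert p (PySem.Set.add s z)).items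
        = g.items.map (fun e => if e.1 == p then (p, PySem.Set.add s z) else e) :=
      PySem.Dict.items_insert_of_contains g _ hgc
    have hhead : s.headD "" ∈ s := headD_mem s "" hsne
    have hgood' : ∀ e ∈ (g.insert p (PySem.Set.add s z)).items,
        e.2 ≠ [] ∧ e.2.Nodup ∧ ∀ v ∈ e.2, (e.1, v) ∈ L := by
      intro e he
      rw [hitems'] at he
      obtain ⟨e', he', heq⟩ := List.mem_map.mp he
      rcases hqk : (e'.1 == p) with _ | _
      · rw [← heq]; simp only [hqk]
        exact hgood e' he'
      · rw [← heq]; simp only [hqk, if_true]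
        have he1 : e'.1 = p := by simpa using hqk
        refine ⟨add_ne_nil s z hsne, PySem.Set.nodup_add s z hsnd, ?_⟩
        intro v hv
        rcases (PySem.Set.mem_add ..).mp hv with hv | hv
        · exact hsL v hv
        · subst hv; exact hqL
    refine ⟨?_, hgood', PySem.Dict.nodup_keys_insert g p _ hnodup⟩
    by_cases hc : condB L p z = true
    · -- all values at p equal z; s = [z]; both dicts unchanged
      have hall := (condB_iff L p z).mp hc
      have hsz : ∀ v ∈ s, v = z := fun v hv => hall (p, v) (hsL v hv) rfl
      have hszl : s = [z] := by
        cases s with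
        | nil => exact absurd rfl hsne
        | cons a t =>
          have ha : a = z := hsz a (by simp)
          cases t with
          | nil => rw [ha]
          | cons b r =>
            exfalso
            have hb : b = z := hsz b (by simp)
            have := hsnd
            rw [ha, hb] at this
            simp at this
      have haddz : PySem.Set.add s z = s := PySem.Set.add_of_mem (by rw [hszl]; simp)
      have hgeq : g.insert p (PySem.Set.add s z) = g := by
        apply PySem.Dict.ext
        rw [hitems']
        have : List.map (fun e => if (e.1 == p) = true then (p, PySem.Set.add s z) else e) g.items
            = List.map id g.items := by
          apply List.map_congr_left
          intro e he
          rcases hqk : (e.1 == p) with _ | _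
          · simp
          · have he1 : e.1 = p := by simpa using hqk
            have he2 : e.2 = s := items_key_eq g hnodup he (he1 ▸ hg)
            simp only [id_eq, if_true, haddz]
            rw [← he1, ← he2]
        simpa using this
      rw [if_pos hc, hgeq]
      -- d.insert p z = d: (p, z) is already d's entry at p
      have hpz : (p, z) ∈ d.items := by
        rw [hitems]
        apply List.mem_filterMap.mpr
        refine ⟨(p, s), PySem.Dict.mem_items_of_get?_eq_some g hg, ?_⟩
        have hh : (p, s).2.headD "" = z := by rw [hszl]; rfl
        unfold maskB
        rw [hh, if_pos hc]
      have hdc : d.contains p = true := by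
        have : p ∈ d.keys := by
          simp only [PySem.Dict.keys]
          exact List.mem_map_of_mem hpz
        exact (PySem.Dict.contains_iff_mem_keys d p).mpr this
      have hdeq : d.insert p z = d := by
        apply PySem.Dict.ext
        rw [PySem.Dict.items_insert_of_contains d z hdc]
        have : List.map (fun e => if (e.1 == p) = true then (p, z) else e) d.items
            = List.map id d.items := by
          apply List.map_congr_left
          intro e he
          rcases hqk : (e.1 == p) with _ | _
          · simp
          · have he1 : e.1 = p := by simpa using hqk
            -- e comes from a g-entry at key p, which is (p, s)
            rw [hitems] at he
            obtain ⟨e', he', hmask⟩ := List.mem_filterMap.mp he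
            have hee : e = (e'.1, e'.2.headD "") := by
              unfold maskB at hmask
              split at hmask
              · exact (Option.some.inj hmask).symm
              · cases hmask
            have he'1 : e'.1 = p := by rw [← he1, hee]
            have he'2 : e'.2 = s := items_key_eq g hnodup he' (he'1 ▸ hg)
            have hepz : e = (p, z) := by
              rw [hee, he'1, he'2, hszl]
              rfl
            simp [hepz]
        simpa using this
      rw [hdeq, hitems]
    · -- conflict at p: the masked entry stays none on both sides, d unchanged
      rw [if_neg (by simpa using hc), hitems', List.filterMap_map, hitems]
      apply List.filterMap_congr
      intro e he
      rcases hqk : (e.1 == p) with _ | _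
      · have hne' : e.1 ≠ p := by simpa using hqk
        simp [hne']
      · have he1 : e.1 = p := by simpa using hqk
        have he2 : e.2 = s := items_key_eq g hnodup he (he1 ▸ hg)
        -- the mask reads only the key and the head of the set, both preserved by the add
        simp only [Function.comp_def, hqk, if_true]
        unfold maskB
        rw [headD_add s z hsne]
        simp [he1, he2]

lemma inv2_foldl (L l : List (String × String)) (hsub : ∀ q ∈ l, q ∈ L)
    (g : PySem.Dict String (PySem.Set String)) (d : PySem.Dict String String)
    (h : Inv2 L g d) : Inv2 L (l.foldl stepB2 g) (l.foldl (stepD L) d) := by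
  induction l generalizing g d with
  | nil => exact h
  | cons q t ih =>
    simp only [List.foldl_cons]
    exact ih (fun r hr => hsub r (List.mem_cons_of_mem _ hr)) _ _
      (inv2_step L g d q (hsub q (List.mem_cons_self ..)) h)

-- at the end the mask coincides with the singleton selector
lemma mask_eq_sing_final (L : List (String × String)) :
    ∀ q ∈ (L.foldl stepB2 PySem.Dict.empty).items, maskB L q = singB q := by
  have h0 : Inv2 L PySem.Dict.empty PySem.Dict.empty :=
    ⟨rfl, by simp [PySem.Dict.empty], PySem.Dict.nodup_keys_empty⟩
  obtain ⟨_, hgood, hnodup⟩ := inv2_foldl L L (fun q hq => hq) _ _ h0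
  intro q hq
  obtain ⟨hne, hnd, hmem⟩ := hgood q hq
  have hget : (L.foldl stepB2 PySem.Dict.empty).get? q.1 = some q.2 :=
    PySem.Dict.get?_of_mem_items _ hq hnodup
  match hq2 : q.2 with
  | [] => exact absurd hq2 hne
  | [v] =>
    have hc : condB L q.1 v = true := by
      apply (condB_iff L q.1 v).mpr
      intro r hr hr1
      obtain ⟨s', hs', hvin⟩ := groups_complete L PySem.Dict.empty r hr
      rw [hr1, hget] at hs'
      have : s' = q.2 := (Option.some.inj hs').symm
      rw [this, hq2] at hvin
      simpa using hvin
    unfold maskB singB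
    rw [hq2]
    simp [hc]
  | v :: w :: r =>
    have hvw : v ≠ w := by
      rw [hq2] at hnd
      rw [List.nodup_cons] at hnd
      intro h
      exact hnd.1 (h ▸ List.mem_cons_self ..)
    have hc : condB L q.1 (q.2.headD "") = false := by
      rcases hb : condB L q.1 (q.2.headD "") with _ | _
      · rfl
      · exfalso
        have hall := (condB_iff L q.1 (q.2.headD "")).mp hb
        have hv : v = q.2.headD "" := by rw [hq2]; rfl
        have hw : w = q.2.headD "" :=
          hall (q.1, w) (hmem w (by rw [hq2]; simp)) rfl
        exact hvw (hv.trans hw.symm)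
    unfold maskB singB
    rw [hq2]
    have hc' : condB L q.1 ((v :: w :: r).headD "") = false := by
      rw [← hq2]
      exact hc
    have hcv : condB L q.1 v = false := by simpa using hc'
    simp [hcv]

-- ===== VERDICT (by name: the statement is the Claim_ definition above) =====
theorem build_prefix3_zkp_mapping_py_spec : Claim_equal_build_prefix3_zkp_mapping_py := by
  intro mapping _
  unfold Spec_build_prefix3_zkp_mapping_py build_prefix3_zkp_mapping_py_alt
  rw [A_eq_filterMap_sing, foldlB_eq_pairs]
  set L := pairsOf mapping with hL
  have h0 : Inv2 L PySem.Dict.empty PySem.Dict.empty :=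
    ⟨rfl, by simp [PySem.Dict.empty], PySem.Dict.nodup_keys_empty⟩
  obtain ⟨hitems, _, _⟩ := inv2_foldl L L (fun q hq => hq) _ _ h0
  show (L.foldl stepB2 PySem.Dict.empty).items.filterMap singB
      = (L.foldl (fun d q => if L.all (fun r => !(r.1 == q.1) || (r.2 == q.2))
          then d.insert q.1 q.2 else d) PySem.Dict.empty).items
  have hstep : (fun d q => if L.all (fun r => !(r.1 == q.1) || (r.2 == q.2))
      then d.insert q.1 q.2 else d) = stepD L := by
    funext d q
    rfl
  rw [hstep, hitems]
  exact (List.filterMap_congr (mask_eq_sing_final L)).symm
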